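-- pv_equiv track=rewrite | github.com/Ahrimdon/pdf417-decoder | ref/not-working/dev_v2.py | text_to_codewords
-- ===== SOURCE A (Python) =====
-- def text_to_codewords(text):
--     """Convert text to PDF-417 codewords"""
--     codewords = []
--     current_word = 0
--     bit_count = 0
--
--     for char in text:
--         # Simple conversion (this is a basic approximation)
--         char_val = ord(char)
--
--         # Pack bits into codewords
--         current_word = (current_word << 8) | char_val
--         bit_count += 8
--
--         # When we have 16 bits, add to codewords
--         while bit_count >= 16:
--             codewords.append(current_word >> (bit_count - 16))
--             current_word &= (1 << (bit_count - 16)) - 1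
--             bit_count -= 16
--
--     # Handle any remaining bits
--     if bit_count > 0:
--         codewords.append(current_word << (16 - bit_count))
--
--     return codewords
-- ===== SOURCE B (Python) =====
-- def text_to_codewords(text):
--     """Convert text to PDF-417 codewords"""
--     vals = [ord(c) for c in text]
--     out = []
--     i = 0
--     while i + 1 < len(vals):
--         out.append((vals[i] << 8) | vals[i + 1])
--         i += 2
--     if i < len(vals):
--         out.append(vals[i] << 8)
--     return out
-- ===== Notes on version B (the rewrite author's own statement) =====
-- stated objective: simpler
-- what changed: Replaces A's bit-accumulator state machine (current_word/bit_count with an inner while draining 16-bit chunks and a final padding branch) by direct pair consumption: take two code points at a time and emit (hi<<8)|lo, padding a lone trailing byte with <<8.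
import Mathlib
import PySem

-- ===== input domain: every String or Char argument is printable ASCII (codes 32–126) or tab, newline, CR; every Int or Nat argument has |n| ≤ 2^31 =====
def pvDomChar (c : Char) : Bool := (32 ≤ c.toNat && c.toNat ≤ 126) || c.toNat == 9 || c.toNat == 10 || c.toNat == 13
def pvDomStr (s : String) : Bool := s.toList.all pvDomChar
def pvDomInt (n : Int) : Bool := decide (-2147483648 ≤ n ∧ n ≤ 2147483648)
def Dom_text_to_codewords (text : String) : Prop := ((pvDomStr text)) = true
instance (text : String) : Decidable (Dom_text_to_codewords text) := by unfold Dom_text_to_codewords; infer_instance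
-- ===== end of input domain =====

-- B replaces A's bit-accumulator state machine (current_word/bit_count, inner 16-bit-drain
-- while loop and final padding branch) by direct pair consumption of the code points: simpler.
-- Python '<<'/'>>' on nonneg ints are ported exactly as *2^k and floordiv by 2^k; '|' and '&' as PySem.Int.bor/band.

-- ===== PORT A =====
-- the inner 'while bit_count >= 16' loop
def pvAWhile (codewords : List Int) (current_word : Int) (bit_count : Int) : List Int × Int × Int :=
  if h : 16 ≤ bit_count then
    pvAWhile (codewords ++ [PySem.Int.floordiv current_word (2 ^ (bit_count - 16).toNat)])
             (PySem.Int.band current_word (1 * 2 ^ (bit_count - 16).toNat - 1))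
             (bit_count - 16)
  else (codewords, current_word, bit_count)
termination_by bit_count.toNat
decreasing_by omega

-- body of 'for char in text'
def pvAStep (st : List Int × Int × Int) (ch : Char) : List Int × Int × Int :=
  let char_val : Int := (ch.toNat : Int)
  let current_word := PySem.Int.bor (st.2.1 * 2 ^ 8) char_val
  pvAWhile st.1 current_word (st.2.2 + 8)

-- 'if bit_count > 0: codewords.append(current_word << (16 - bit_count))'
def pvAFinish (st : List Int × Int × Int) : List Int :=
  if st.2.2 > 0 then st.1 ++ [st.2.1 * 2 ^ (16 - st.2.2).toNat] else st.1

def text_to_codewords (text : String) : List Int :=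
  pvAFinish (text.toList.foldl pvAStep ([], 0, 0))

-- ===== PORT B =====
-- 'while i + 1 < len(vals): out.append((vals[i] << 8) | vals[i+1]); i += 2' then lone tail;
-- the guards keep both indices in range, so List.getD is exact for Python's vals[i]
def pvBLoop (vals : List Int) (i : Nat) (out : List Int) : List Int :=
  if i + 1 < vals.length then
    pvBLoop vals (i + 2) (out ++ [PySem.Int.bor (vals.getD i 0 * 2 ^ 8) (vals.getD (i + 1) 0)])
  else if i < vals.length then out ++ [vals.getD i 0 * 2 ^ 8]
  else out
termination_by vals.length - i

def text_to_codewords_alt (text : String) : List Int :=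
  pvBLoop (text.toList.map (fun c => (c.toNat : Int))) 0 []

-- ===== PRECONDITION & SPEC =====
def Spec_text_to_codewords (text : String) (out : List Int) : Prop := out = text_to_codewords_alt text
instance (text : String) (out : List Int) : Decidable (Spec_text_to_codewords text out) := by unfold Spec_text_to_codewords; infer_instance

-- ===== CLAIM (what is proved, stated in full; the proofs are below) =====
def Claim_equal_text_to_codewords : Prop := ∀ (text : String), Dom_text_to_codewords text → Spec_text_to_codewords text (text_to_codewords text)

-- ===== LEMMAS AND PROOFS =====

theorem pvAWhile_stop (out : List Int) (cw bc : Int) (h : bc < 16) :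
    pvAWhile out cw bc = (out, cw, bc) := by
  rw [pvAWhile, dif_neg (by omega)]

theorem pvAWhile_sixteen (out : List Int) (cw : Int) :
    pvAWhile out cw 16 = (out ++ [cw], 0, 0) := by
  rw [pvAWhile, dif_pos (by norm_num)]
  norm_num [pvAWhile_stop, PySem.Int.band_zero,
    PySem.Int.floordiv_eq_ediv_of_pos (a := cw) (b := 1) one_pos]

theorem pvAStep_zero (out : List Int) (a : Int) (ch : Char) :
    pvAStep (out, a, 0) ch = (out, PySem.Int.bor (a * 2 ^ 8) (ch.toNat : Int), 8) := by
  simp [pvAStep, pvAWhile_stop _ _ 8 (by norm_num)]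

theorem pvAStep_eight (out : List Int) (a : Int) (ch : Char) :
    pvAStep (out, a, 8) ch = (out ++ [PySem.Int.bor (a * 2 ^ 8) (ch.toNat : Int)], 0, 0) := by
  simp [pvAStep]
  exact pvAWhile_sixteen out _

-- proof-only helper: pair consumption as structural recursion on the suffix
def pvPairs : List Int → List Int → List Int
  | a :: b :: rest, out => pvPairs rest (out ++ [PySem.Int.bor (a * 2 ^ 8) b])
  | [a], out => out ++ [a * 2 ^ 8]
  | [], out => out

theorem pvBLoop_drop (vals : List Int) (i : Nat) (out : List Int) :
    pvBLoop vals i out = pvPairs (vals.drop i) out := by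
  rw [pvBLoop]
  split
  · next h1 =>
      have hi : i < vals.length := by omega
      have hi1 : i + 1 < vals.length := h1
      rw [List.drop_eq_getElem_cons hi, List.drop_eq_getElem_cons hi1]
      rw [pvBLoop_drop vals (i + 2) _]
      simp [pvPairs, List.getD, List.getElem?_eq_getElem hi, List.getElem?_eq_getElem hi1]
  · split
    · next h1 h2 =>
        rw [List.drop_eq_getElem_cons h2, List.drop_eq_nil_iff.mpr (by omega)]
        simp [pvPairs, List.getD, List.getElem?_eq_getElem h2]
    · next h1 h2 =>
        rw [List.drop_eq_nil_iff.mpr (by omega)]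
        simp [pvPairs]
termination_by vals.length - i

theorem pvMain (l : List Char) (out : List Int) :
    pvAFinish (l.foldl pvAStep (out, 0, 0)) =
      pvPairs (l.map (fun c => (c.toNat : Int))) out := by
  match l with
  | [] => simp [pvAFinish, pvPairs]
  | [a] =>
      simp [List.foldl, pvAStep_zero, pvAFinish, pvPairs, PySem.Int.bor_comm,
        PySem.Int.bor_zero]
  | a :: b :: rest =>
      have ih := pvMain rest (out ++ [PySem.Int.bor ((a.toNat : Int) * 2 ^ 8) (b.toNat : Int)])
      simp only [List.foldl, pvAStep_zero, pvAStep_eight, List.map, pvPairs]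
      rw [show PySem.Int.bor (0 * 2 ^ 8) (a.toNat : Int) = (a.toNat : Int) by
        simp [PySem.Int.bor_comm, PySem.Int.bor_zero]]
      exact ih
termination_by l.length

-- ===== VERDICT (by name: the statement is the Claim_ definition above) =====
theorem text_to_codewords_spec : Claim_equal_text_to_codewords := by
  intro text _
  unfold Spec_text_to_codewords text_to_codewords text_to_codewords_alt
  rw [pvBLoop_drop, List.drop_zero]
  exact pvMain text.toList []
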